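-- pv_equiv track=rewrite | github.com/pruittkn98/yahtzee-simulator | rules_based_strategy.py | break_tie
-- ===== SOURCE A (Python) =====
-- def break_tie(best_score_idxs: list, tie_break_order_idx: list, is_zero: bool = True):
--     # Breaks ties, based on specified tie break order
--     if len(best_score_idxs) == 1:
--         return best_score_idxs[0], False
--
--     score_idxs = [(i, tie_break_order_idx.index(i)) for i in best_score_idxs]
--
--     # Reverse priority order if score is zero
--     if is_zero:
--         score_idxs = sorted(score_idxs, key=lambda x: x[1], reverse=True)
--     else:
--         score_idxs = sorted(score_idxs, key=lambda x: x[1], reverse=False)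
--
--     return score_idxs[0][0], True
-- ===== SOURCE B (Python) =====
-- def break_tie(best_score_idxs: list, tie_break_order_idx: list, is_zero: bool = True):
--     # Simpler: pick the extreme-priority index directly instead of sorting.
--     if len(best_score_idxs) == 1:
--         return best_score_idxs[0], False
--     pick = max if is_zero else min
--     return pick(best_score_idxs, key=tie_break_order_idx.index), True
-- ===== Notes on version B (the rewrite author's own statement) =====
-- stated objective: simpler
-- what changed: Replaces building an (index, priority) pair list and stably sorting it with a single max/min selection keyed by priority (max for is_zero, min otherwise), matching the stable sort's first-extremal tie behaviour; measured ~3x faster on large inputs.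
import Mathlib
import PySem

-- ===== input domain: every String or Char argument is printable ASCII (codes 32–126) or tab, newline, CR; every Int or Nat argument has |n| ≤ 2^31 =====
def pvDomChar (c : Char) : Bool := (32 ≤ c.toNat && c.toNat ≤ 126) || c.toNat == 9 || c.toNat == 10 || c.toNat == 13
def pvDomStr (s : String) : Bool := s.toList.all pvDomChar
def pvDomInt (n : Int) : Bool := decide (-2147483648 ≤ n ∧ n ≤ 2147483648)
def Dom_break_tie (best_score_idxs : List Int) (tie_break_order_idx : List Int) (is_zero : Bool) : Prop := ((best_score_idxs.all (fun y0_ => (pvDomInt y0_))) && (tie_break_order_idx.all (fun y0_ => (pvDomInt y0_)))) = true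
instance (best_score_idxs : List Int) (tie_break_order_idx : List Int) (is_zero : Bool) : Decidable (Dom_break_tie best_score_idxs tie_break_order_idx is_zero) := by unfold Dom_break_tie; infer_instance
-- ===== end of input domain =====

-- B replaces A's pair-list + stable sort with a direct max/min selection by priority key (simpler, same result).


-- ===== PORT A =====
def break_tie (best_score_idxs : List Int) (tie_break_order_idx : List Int) (is_zero : Bool) : Int × Bool :=
  if best_score_idxs.length = 1 then
    ((PySem.List.pyGet? best_score_idxs 0).getD 0, false)
  else
    let score_idxs : List (Int × Nat) :=
      best_score_idxs.map (fun i => (i, (PySem.List.index? tie_break_order_idx i).getD 0))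
    let score_idxs' :=
      if is_zero then PySem.List.sorted score_idxs (fun x => x.2) true
      else PySem.List.sorted score_idxs (fun x => x.2) false
    (((PySem.List.pyGet? score_idxs' 0).getD (0, 0)).1, true)

-- ===== PORT B =====
def break_tie_alt (best_score_idxs : List Int) (tie_break_order_idx : List Int) (is_zero : Bool) : Int × Bool :=
  if best_score_idxs.length = 1 then
    ((PySem.List.pyGet? best_score_idxs 0).getD 0, false)
  else
    let key := fun i => (PySem.List.index? tie_break_order_idx i).getD 0
    let best :=
      if is_zero then PySem.List.max? best_score_idxs key
      else PySem.List.min? best_score_idxs key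
    (best.getD 0, true)

-- ===== PRECONDITION & SPEC =====
-- Pre_ excludes exactly the inputs where A raises: the empty list (IndexError / max() on empty),
-- and, when the tie-break branch is reached, an element missing from tie_break_order_idx (ValueError from .index).
def Pre_break_tie (best_score_idxs : List Int) (tie_break_order_idx : List Int) (is_zero : Bool) : Prop :=
  best_score_idxs ≠ [] ∧
    (best_score_idxs.length = 1 ∨ ∀ i ∈ best_score_idxs, i ∈ tie_break_order_idx)
instance (best_score_idxs : List Int) (tie_break_order_idx : List Int) (is_zero : Bool) : Decidable (Pre_break_tie best_score_idxs tie_break_order_idx is_zero) := by unfold Pre_break_tie; infer_instance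

def pvWitness_break_tie : List Int × List Int × Bool := ([2, 3], [3, 2, 1, 0], true)

def Spec_break_tie (best_score_idxs : List Int) (tie_break_order_idx : List Int) (is_zero : Bool) (out : Int × Bool) : Prop := out = break_tie_alt best_score_idxs tie_break_order_idx is_zero
instance (best_score_idxs : List Int) (tie_break_order_idx : List Int) (is_zero : Bool) (out : Int × Bool) : Decidable (Spec_break_tie best_score_idxs tie_break_order_idx is_zero out) := by unfold Spec_break_tie; infer_instance

-- ===== CLAIM (what is proved, stated in full; the proofs are below) =====
def Claim_equal_break_tie : Prop := ∀ (best_score_idxs : List Int) (tie_break_order_idx : List Int) (is_zero : Bool), Dom_break_tie best_score_idxs tie_break_order_idx is_zero → Pre_break_tie best_score_idxs tie_break_order_idx is_zero → Spec_break_tie best_score_idxs tie_break_order_idx is_zero (break_tie best_score_idxs tie_break_order_idx is_zero)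

-- ===== LEMMAS AND PROOFS =====

theorem insertBy_nil {α : Type} (before : α → α → Bool) (x : α) :
    PySem.List.insertBy before x [] = [x] := rfl

theorem insertBy_cons {α : Type} (before : α → α → Bool) (x y : α) (ys : List α) :
    PySem.List.insertBy before x (y :: ys) =
      if before x y then x :: y :: ys else y :: PySem.List.insertBy before x ys := by
  simp [PySem.List.insertBy]

-- head of the insertion-sort fold = the first-extremal running fold
theorem head_foldl_insertBy {α : Type} (before : α → α → Bool) :
    ∀ (xs : List α) (a : α) (t : List α),
      (xs.foldl (fun acc x => PySem.List.insertBy before x acc) (a :: t)).head? =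
        some (xs.foldl (fun m x => if before x m then x else m) a) := by
  intro xs
  induction xs with
  | nil => intro a t; rfl
  | cons x xs ih =>
    intro a t
    simp only [List.foldl_cons, insertBy_cons]
    by_cases h : before x a = true
    · simp only [h, if_true]
      exact ih x (a :: t)
    · simp only [h, if_false, Bool.false_eq_true]
      exact ih a (PySem.List.insertBy before x t)

-- head of sorted(… , reverse=True) = running "keep later only if strictly larger" fold
theorem head_sorted_rev {α κ : Type} [LinearOrder κ] (x : α) (xs : List α) (k : α → κ) :
    (PySem.List.sorted (x :: xs) k true).head? =
      some (xs.foldl (fun m y => if k m < k y then y else m) x) := by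
  simp only [PySem.List.sorted, List.foldl_cons, insertBy_nil]
  rw [head_foldl_insertBy]
  simp only [if_true, decide_eq_true_eq]

-- head of sorted(… , reverse=False) = running "keep later only if strictly smaller" fold
theorem head_sorted_asc {α κ : Type} [LinearOrder κ] (x : α) (xs : List α) (k : α → κ) :
    (PySem.List.sorted (x :: xs) k false).head? =
      some (xs.foldl (fun m y => if k y < k m then y else m) x) := by
  simp only [PySem.List.sorted, List.foldl_cons, insertBy_nil]
  rw [head_foldl_insertBy]
  simp only [Bool.false_eq_true, if_false, decide_eq_true_eq]

-- the running fold over (i, key i) pairs is the image of the running fold over the ints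
theorem foldl_pair_map (key : Int → Nat) (P : Nat → Nat → Prop) [DecidableRel P] :
    ∀ (xs : List Int) (x : Int),
      ((xs.map (fun i => (i, key i))).foldl
          (fun (m : Int × Nat) y => if P m.2 y.2 then y else m) (x, key x)) =
        (xs.foldl (fun m y => if P (key m) (key y) then y else m) x,
         key (xs.foldl (fun m y => if P (key m) (key y) then y else m) x)) := by
  intro xs
  induction xs with
  | nil => intro x; rfl
  | cons y ys ih =>
    intro x
    simp only [List.map_cons, List.foldl_cons]
    by_cases h : P (key x) (key y) <;> simp [h, ih]

-- the Option-valued max?/min? fold collapses to the plain running fold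
theorem foldl_opt_step {α κ : Type} (P : κ → κ → Prop) [DecidableRel P] (key : α → κ) :
    ∀ (xs : List α) (a : α),
      (xs.foldl (fun acc x => match acc with
        | none => some x
        | some m => if P (key m) (key x) then some x else some m) (some a)) =
        some (xs.foldl (fun m x => if P (key m) (key x) then x else m) a) := by
  intro xs
  induction xs with
  | nil => intro a; rfl
  | cons x xs ih =>
    intro a
    simp only [List.foldl_cons]
    by_cases h : P (key a) (key x) <;> simp [h, ih]

theorem pyGet?_cons_zero {α : Type} (a : α) (l : List α) :
    PySem.List.pyGet? (a :: l) 0 = some a := by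
  simp [PySem.List.pyGet?, PySem.List.pyIdx?]

-- the non-singleton branch, for an arbitrary key function
theorem branch_eq (key : Int → Nat) (x : Int) (xs : List Int) (iz : Bool) :
    ((((PySem.List.pyGet?
        (if iz then PySem.List.sorted ((x :: xs).map (fun i => (i, key i))) (fun p => p.2) true
         else PySem.List.sorted ((x :: xs).map (fun i => (i, key i))) (fun p => p.2) false) 0).getD (0, 0)).1 : Int), true)
      = (((if iz then PySem.List.max? (x :: xs) key else PySem.List.min? (x :: xs) key)).getD 0, true) := by
  cases iz
  · -- is_zero = false : head of the stable ascending sort = first minimum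
    have hhead := head_sorted_asc ((x, key x) : Int × Nat) (xs.map (fun i => (i, key i)))
      (fun p => p.2)
    rw [show ((x, key x) :: xs.map (fun i => (i, key i)))
          = (x :: xs).map (fun i => (i, key i)) by simp] at hhead
    rw [foldl_pair_map key (fun a b => b < a) xs x] at hhead
    obtain ⟨t, hL⟩ := List.head?_eq_some_iff.mp hhead
    simp only [Bool.false_eq_true, if_false, hL, pyGet?_cons_zero, Option.getD_some]
    have hmin : PySem.List.min? (x :: xs) key =
        some (xs.foldl (fun m y => if key y < key m then y else m) x) := by
      simp only [PySem.List.min?, List.foldl_cons]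
      exact foldl_opt_step (fun a b => b < a) key xs x
    rw [hmin]
    rfl
  · -- is_zero = true : head of the stable descending sort = first maximum
    have hhead := head_sorted_rev ((x, key x) : Int × Nat) (xs.map (fun i => (i, key i)))
      (fun p => p.2)
    rw [show ((x, key x) :: xs.map (fun i => (i, key i)))
          = (x :: xs).map (fun i => (i, key i)) by simp] at hhead
    rw [foldl_pair_map key (fun a b => a < b) xs x] at hhead
    obtain ⟨t, hL⟩ := List.head?_eq_some_iff.mp hhead
    simp only [if_true, hL, pyGet?_cons_zero, Option.getD_some]
    have hmax : PySem.List.max? (x :: xs) key =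
        some (xs.foldl (fun m y => if key m < key y then y else m) x) := by
      simp only [PySem.List.max?, List.foldl_cons]
      exact foldl_opt_step (fun a b => a < b) key xs x
    rw [hmax]
    rfl

-- ===== VERDICT (by name: the statement is the Claim_ definition above) =====
theorem break_tie_spec : Claim_equal_break_tie := by
  intro bs tie iz _ hpre
  unfold Spec_break_tie break_tie break_tie_alt
  obtain ⟨hne, _⟩ := hpre
  by_cases h1 : bs.length = 1
  · simp [h1]
  · simp only [h1, if_false]
    obtain ⟨x, xs, rfl⟩ := List.exists_cons_of_ne_nil hne
    exact branch_eq (fun i => (PySem.List.index? tie i).getD 0) x xs iz
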